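-- pv_equiv track=rewrite | github.com/Leotio/Happy_llm_learning | Chapter5/Pretrain_code/s4_sft_dataset.py | generate_loss_mask
-- ===== SOURCE A (Python) =====
-- def generate_loss_mask(input_ids):
--     mask = [0] * len(input_ids)
--     # a_sequence是Assistant回复的起始标志， Token ID 序列代表字符串：<|im\_start|>assistant\n
--     a_sequence = [3, 1074, 537, 500, 203]
--     a_length = len(a_sequence)
--     n = len(input_ids)
--     i = 0
--
--     # 确定 i 开始的连续 a_length 个 Token ID，是否与预定义 a_sequence 完全一致
--     while i <= n-a_length:
--         match = True
--         for k in range(a_length):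
--             if input_ids[i+k] != a_sequence[k]:
--                 match = False
--                 break
--         # 如果找到了一个Assistant回复的起始标志
--         if match:
--             # 就开始查找第⼀个4, 4 为 <|im_end|> EOS id
--             j = None
--             for idx in range(i + a_length, n):
--                 if input_ids[idx] == 4:
--                     j = idx
--                     break
--
--             # j不为None，就说明找到了结束标志
--             if j is not None:
--                 start = i + a_length
--                 end = j
--                 if start <= end:
--                     # 找到了助手回复的起始标记 (a_sequence) 和结束标记 (<|im_end|>，即 ID 4)，
--                     # 就将它们之间的所有 Token 对应的 mask 值设置为 1，从而激活这些 Token 的损失计算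
--                     for pos in range(start, end+1):
--                         if pos < len(mask):
--                             mask[pos] = 1
--             # 更新 i 值，继续while循环
--             i += a_length
--
--         else:
--             i += 1
--     return mask
-- ===== SOURCE B (Python) =====
-- def generate_loss_mask(input_ids):
--     n = len(input_ids)
--     a_sequence = [3, 1074, 537, 500, 203]
--     mask = [0] * n
--     # next4[p] = smallest idx >= p with input_ids[idx] == 4, else None (one backward pass)
--     next4 = [None] * (n + 1)
--     for p in range(n - 1, -1, -1):
--         next4[p] = p if input_ids[p] == 4 else next4[p + 1]
--     write = 0  # first position not yet known to be marked
--     i = 0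
--     while i <= n - 5:
--         if input_ids[i:i + 5] == a_sequence:
--             start = i + 5
--             j = next4[start]
--             if j is not None:
--                 for pos in range(max(start, write), j + 1):
--                     mask[pos] = 1
--                 if j + 1 > write:
--                     write = j + 1
--             i += 5
--         else:
--             i += 1
--     return mask
-- ===== Notes on version B (the rewrite author's own statement) =====
-- stated objective: alternative
-- what changed: B precomputes a next-occurrence-of-EOS(4) table in one backward pass and marks interval unions with a monotone write pointer, so A's per-match forward rescan for 4 and its re-marking of overlapping intervals disappear; on the generated inputs (markers rare) this was not measurably faster.
import Mathlib
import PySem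

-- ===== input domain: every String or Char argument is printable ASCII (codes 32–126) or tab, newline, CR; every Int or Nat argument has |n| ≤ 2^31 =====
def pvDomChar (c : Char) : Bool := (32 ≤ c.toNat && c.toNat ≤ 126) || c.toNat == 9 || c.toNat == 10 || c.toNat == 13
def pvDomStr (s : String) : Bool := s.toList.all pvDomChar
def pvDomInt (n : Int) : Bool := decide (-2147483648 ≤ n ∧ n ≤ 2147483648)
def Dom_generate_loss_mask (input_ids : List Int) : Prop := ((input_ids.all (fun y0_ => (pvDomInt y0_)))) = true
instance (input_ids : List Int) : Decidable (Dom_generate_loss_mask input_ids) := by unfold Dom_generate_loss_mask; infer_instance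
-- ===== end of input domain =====

-- B replaces A's per-match forward rescan for the EOS id 4 by a precomputed next-occurrence
-- table and a write pointer that never re-marks a position (objective: alternative algorithm).

-- ===== PORT A =====
def pvASeq : List Int := [3, 1074, 537, 500, 203]

-- inner 'for k in range(a_length)' elementwise comparison (break = early exit of .all)
def pvMatchA (input_ids : List Int) (i : Nat) : Bool :=
  (List.range 5).all (fun k => input_ids.getD (i + k) 0 == pvASeq.getD k 0)

-- 'for idx in range(i + a_length, n): if input_ids[idx] == 4: j = idx; break'
def pvFind4A (input_ids : List Int) (start n : Nat) : Option Nat :=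
  (List.range' start (n - start)).find? (fun idx => input_ids.getD idx 0 == 4)

-- 'for pos in range(start, end+1): if pos < len(mask): mask[pos] = 1'
def pvMarkA (mask : List Int) (start fin : Nat) : List Int :=
  (List.range' start (fin + 1 - start)).foldl
    (fun m pos => if pos < m.length then m.set pos 1 else m) mask

def pvLoopA (input_ids : List Int) (n i : Nat) (mask : List Int) : List Int :=
  if _h : i + 5 ≤ n then
    if pvMatchA input_ids i then
      let mask' :=
        match pvFind4A input_ids (i + 5) n with
        | some j => if i + 5 ≤ j then pvMarkA mask (i + 5) j else mask
        | none => mask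
      pvLoopA input_ids n (i + 5) mask'
    else pvLoopA input_ids n (i + 1) mask
  else mask
termination_by n - i
decreasing_by all_goals omega

def generate_loss_mask (input_ids : List Int) : List Int :=
  pvLoopA input_ids input_ids.length 0 (List.replicate input_ids.length 0)

-- ===== PORT B =====
-- next4[p] = first idx ≥ p with input_ids[idx] == 4 (B's backward-filled array, as the recursion
-- next4[p] = p if input_ids[p] == 4 else next4[p+1] that fills it)
def pvNext4 (input_ids : List Int) (p : Nat) : Option Nat :=
  if _h : p < input_ids.length then
    if input_ids.getD p 0 == 4 then some p else pvNext4 input_ids (p + 1)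
  else none
termination_by input_ids.length - p
decreasing_by omega

-- 'for pos in range(max(start, write), j + 1): mask[pos] = 1'
def pvMarkB (mask : List Int) (start fin : Nat) : List Int :=
  (List.range' start (fin + 1 - start)).foldl (fun m pos => m.set pos 1) mask

def pvLoopB (input_ids : List Int) (n i write : Nat) (mask : List Int) : List Int :=
  if _h : i + 5 ≤ n then
    if PySem.List.slice input_ids (some (i : Int)) (some ((i : Int) + 5)) == pvASeq then
      match pvNext4 input_ids (i + 5) with
      | some j =>
          pvLoopB input_ids n (i + 5) (max write (j + 1)) (pvMarkB mask (max (i + 5) write) j)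
      | none => pvLoopB input_ids n (i + 5) write mask
    else pvLoopB input_ids n (i + 1) write mask
  else mask
termination_by n - i
decreasing_by all_goals omega

def generate_loss_mask_alt (input_ids : List Int) : List Int :=
  pvLoopB input_ids input_ids.length 0 0 (List.replicate input_ids.length 0)

-- ===== PRECONDITION & SPEC =====
def Spec_generate_loss_mask (input_ids : List Int) (out : List Int) : Prop := out = generate_loss_mask_alt input_ids
instance (input_ids : List Int) (out : List Int) : Decidable (Spec_generate_loss_mask input_ids out) := by unfold Spec_generate_loss_mask; infer_instance

-- ===== CLAIM (what is proved, stated in full; the proofs are below) =====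
def Claim_equal_generate_loss_mask : Prop := ∀ (input_ids : List Int), Dom_generate_loss_mask input_ids → Spec_generate_loss_mask input_ids (generate_loss_mask input_ids)

-- ===== LEMMAS AND PROOFS =====

-- generic facts about folds that set positions to 1
lemma foldSet_length (l : List Nat) (mask : List Int) :
    (l.foldl (fun m pos => m.set pos 1) mask).length = mask.length := by
  induction l generalizing mask with
  | nil => rfl
  | cons x l ih => simp [List.foldl_cons, ih]

lemma foldSet_guard_eq (l : List Nat) (mask : List Int) (h : ∀ p ∈ l, p < mask.length) :
    l.foldl (fun m pos => if pos < m.length then m.set pos 1 else m) mask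
      = l.foldl (fun m pos => m.set pos 1) mask := by
  induction l generalizing mask with
  | nil => rfl
  | cons x l ih =>
      simp only [List.foldl_cons]
      rw [if_pos (h x (by simp))]
      exact ih _ (fun p hp => by rw [List.length_set]; exact h p (by simp [hp]))

lemma set_one_of_getD (mask : List Int) (x : Nat) (h : mask.getD x 0 = 1) :
    mask.set x 1 = mask := by
  rw [List.getD_eq_getElem?_getD] at h
  apply List.ext_getElem?
  intro j
  rw [List.getElem?_set]
  split_ifs with h1 h2 <;> simp_all

lemma foldSet_ones_id (l : List Nat) (mask : List Int) (h : ∀ p ∈ l, mask.getD p 0 = 1) :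
    l.foldl (fun m pos => m.set pos 1) mask = mask := by
  induction l with
  | nil => rfl
  | cons x l ih =>
      simp only [List.foldl_cons]
      rw [set_one_of_getD mask x (h x (by simp))]
      exact ih (fun p hp => h p (by simp [hp]))

lemma getD_set_one (mask : List Int) (x p : Nat) (h : mask.getD p 0 = 1) :
    (mask.set x 1).getD p 0 = 1 := by
  rw [List.getD_eq_getElem?_getD, List.getElem?_set] at *
  split_ifs with h1 h2 <;> simp_all

lemma foldSet_getD_one (l : List Nat) (mask : List Int) (p : Nat)
    (h : (p ∈ l ∧ p < mask.length) ∨ mask.getD p 0 = 1) :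
    (l.foldl (fun m pos => m.set pos 1) mask).getD p 0 = 1 := by
  induction l generalizing mask with
  | nil => simpa using h
  | cons x l ih =>
      simp only [List.foldl_cons]
      apply ih
      rcases h with ⟨hm, hlt⟩ | hone
      · rcases List.mem_cons.mp hm with rfl | hm'
        · right
          rw [List.getD_eq_getElem?_getD, List.getElem?_set]
          simp [hlt]
        · left; exact ⟨hm', by simpa using hlt⟩
      · right; exact getD_set_one mask x p hone

-- the two match tests agree on in-range positions
lemma pvMatch_eq (input : List Int) (i : Nat) (h : i + 5 ≤ input.length) :
    pvMatchA input i =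
      (PySem.List.slice input (some (i : Int)) (some ((i : Int) + 5)) == pvASeq) := by
  have hs : PySem.List.slice input (some (i : Int)) (some ((i : Int) + 5))
      = (input.drop i).take 5 := by
    have := PySem.List.slice_natCast_add input i 5
    simpa using this
  rw [hs]
  have hk : ∀ k : Nat, input.getD (i + k) 0 = (input.drop i).getD k 0 := by
    intro k
    simp [List.getD_eq_getElem?_getD, List.getElem?_drop]
  have hlen : 5 ≤ (input.drop i).length := by simp; omega
  obtain ⟨a, l1, e1⟩ : ∃ a l, input.drop i = a :: l := by
    cases hd : input.drop i with
    | nil => rw [hd] at hlen; simp at hlen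
    | cons a l => exact ⟨a, l, rfl⟩
  rw [e1] at hlen
  obtain ⟨b, l2, e2⟩ : ∃ b l, l1 = b :: l := by
    cases hd : l1 with
    | nil => rw [hd] at hlen; simp at hlen
    | cons b l => exact ⟨b, l, rfl⟩
  rw [e2] at hlen
  obtain ⟨c, l3, e3⟩ : ∃ c l, l2 = c :: l := by
    cases hd : l2 with
    | nil => rw [hd] at hlen; simp at hlen
    | cons c l => exact ⟨c, l, rfl⟩
  rw [e3] at hlen
  obtain ⟨d, l4, e4⟩ : ∃ d l, l3 = d :: l := by
    cases hd : l3 with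
    | nil => rw [hd] at hlen; simp at hlen
    | cons d l => exact ⟨d, l, rfl⟩
  rw [e4] at hlen
  obtain ⟨e, l5, e5⟩ : ∃ e l, l4 = e :: l := by
    cases hd : l4 with
    | nil => rw [hd] at hlen; simp at hlen
    | cons e l => exact ⟨e, l, rfl⟩
  simp only [pvMatchA, List.range_succ, List.range_zero]
  simp only [hk, e1, e2, e3, e4, e5]
  simp [pvASeq, List.getD]

-- A's linear search for the first 4 agrees with B's next-occurrence recursion
lemma pvFind4_eq (input : List Int) (start : Nat) :
    pvFind4A input start input.length = pvNext4 input start := by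
  by_cases h : start < input.length
  · rw [pvNext4]
    have : input.length - start = (input.length - (start + 1)) + 1 := by omega
    rw [pvFind4A, this, List.range'_succ, List.find?_cons]
    split
    · simp_all
    · rw [dif_pos h, if_neg (by simp_all)]
      exact pvFind4_eq input (start + 1)
  · rw [pvNext4, dif_neg h, pvFind4A]
    have : input.length - start = 0 := by omega
    simp [this]
termination_by input.length - start
decreasing_by omega

lemma pvNext4_bounds (input : List Int) (p j : Nat) (h : pvNext4 input p = some j) :
    p ≤ j ∧ j < input.length := by
  rw [pvNext4] at h
  split at h
  · split at h
    · simp at h; omega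
    · have := pvNext4_bounds input (p + 1) j h
      omega
  · simp at h
termination_by input.length - p
decreasing_by omega

lemma pvMarkB_length (mask : List Int) (s f : Nat) :
    (pvMarkB mask s f).length = mask.length := foldSet_length _ _

-- A's guarded marking pass equals B's unguarded one when the end is in range
lemma pvMarkA_eq_pvMarkB (mask : List Int) (s f : Nat) (hf : f < mask.length) :
    pvMarkA mask s f = pvMarkB mask s f := by
  apply foldSet_guard_eq
  intro p hp
  have := List.mem_range'_1.mp hp
  omega

-- marking positions that already hold 1 is the identity
lemma pvMarkB_ones_id (mask : List Int) (s f : Nat)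
    (h : ∀ p, s ≤ p → p ≤ f → mask.getD p 0 = 1) :
    pvMarkB mask s f = mask := by
  apply foldSet_ones_id
  intro p hp
  have := List.mem_range'_1.mp hp
  exact h p (by omega) (by omega)

-- the prefix [s, s') of a marking pass can be dropped when it is already all 1
lemma pvMarkB_split (mask : List Int) (s s' f : Nat) (h1 : s ≤ s') (h2 : s' ≤ f + 1)
    (h : ∀ p, s ≤ p → p < s' → mask.getD p 0 = 1) :
    pvMarkB mask s f = pvMarkB mask s' f := by
  unfold pvMarkB
  have hsplit : List.range' s (f + 1 - s)
      = List.range' s (s' - s) ++ List.range' s' (f + 1 - s') := by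
    have := @List.range'_append s (s' - s) (f + 1 - s') 1
    simp only [one_mul] at this
    rw [show s + (s' - s) = s' by omega] at this
    rw [show s' - s + (f + 1 - s') = f + 1 - s by omega] at this
    exact this.symm
  rw [hsplit, List.foldl_append]
  congr 1
  apply foldSet_ones_id
  intro p hp
  have := List.mem_range'_1.mp hp
  exact h p (by omega) (by omega)

lemma pvMarkB_getD_of_one (mask : List Int) (s f p : Nat)
    (h : mask.getD p 0 = 1) : (pvMarkB mask s f).getD p 0 = 1 :=
  foldSet_getD_one _ _ _ (Or.inr h)

lemma pvMarkB_getD_of_mem (mask : List Int) (s f p : Nat)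
    (hs : s ≤ p) (hf : p ≤ f) (hp : p < mask.length) :
    (pvMarkB mask s f).getD p 0 = 1 :=
  foldSet_getD_one _ _ _ (Or.inl ⟨List.mem_range'_1.mpr ⟨hs, by omega⟩, hp⟩)

-- main loop equivalence: invariant — every position in [i, write) is already 1
lemma pvLoop_eq (input : List Int) (n : Nat) (hn : n = input.length) :
    ∀ i write mask, mask.length = n →
      (∀ p, i ≤ p → p < write → mask.getD p 0 = 1) →
      pvLoopA input n i mask = pvLoopB input n i write mask := by
  suffices H : ∀ m i write mask, n - i ≤ m → mask.length = n →
      (∀ p, i ≤ p → p < write → mask.getD p 0 = 1) →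
      pvLoopA input n i mask = pvLoopB input n i write mask by
    intro i write mask h1 h2
    exact H (n - i) i write mask le_rfl h1 h2
  intro m
  induction m with
  | zero =>
      intro i write mask hm hlen hinv
      rw [pvLoopA, pvLoopB, dif_neg (by omega), dif_neg (by omega)]
  | succ m ih =>
      intro i write mask hm hlen hinv
      rw [pvLoopA, pvLoopB]
      by_cases h5 : i + 5 ≤ n
      · rw [dif_pos h5, dif_pos h5]
        rw [← pvMatch_eq input i (by omega)]
        by_cases hmt : pvMatchA input i
        · rw [if_pos hmt, if_pos hmt]
          have hfind : pvFind4A input (i + 5) n = pvNext4 input (i + 5) := by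
            rw [hn, pvFind4_eq]
          cases hj : pvNext4 input (i + 5) with
          | none =>
              simp only [hfind, hj]
              exact ih (i + 5) write mask (by omega) hlen
                (fun p h1 h2 => hinv p (by omega) h2)
          | some j =>
              obtain ⟨hj1, hj2⟩ := pvNext4_bounds input (i + 5) j hj
              simp only [hfind, hj, if_pos hj1]
              have hmm : pvMarkA mask (i + 5) j = pvMarkB mask (max (i + 5) write) j := by
                rw [pvMarkA_eq_pvMarkB mask (i + 5) j (by omega)]
                by_cases hw : write ≤ j + 1
                · apply pvMarkB_split mask (i + 5) (max (i + 5) write) j (le_max_left _ _)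
                    (by omega)
                  intro p hp1 hp2
                  exact hinv p (by omega) (by omega)
                · rw [pvMarkB_ones_id mask (i + 5) j
                      (fun p hp1 hp2 => hinv p (by omega) (by omega)),
                    pvMarkB_ones_id mask (max (i + 5) write) j
                      (fun p hp1 hp2 => hinv p (by omega) (by omega))]
              rw [hmm]
              apply ih (i + 5) (max write (j + 1)) _ (by omega)
              · rw [pvMarkB_length]; exact hlen
              · intro p hp1 hp2
                by_cases hpw : p < write
                · exact pvMarkB_getD_of_one _ _ _ _ (hinv p (by omega) hpw)
                · exact pvMarkB_getD_of_mem _ _ _ _ (by omega) (by omega) (by omega)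
        · rw [if_neg hmt, if_neg hmt]
          exact ih (i + 1) write mask (by omega) hlen
            (fun p h1 h2 => hinv p (by omega) h2)
      · rw [dif_neg h5, dif_neg h5]

-- ===== VERDICT (by name: the statement is the Claim_ definition above) =====
theorem generate_loss_mask_spec : Claim_equal_generate_loss_mask := by
  intro input _
  unfold Spec_generate_loss_mask generate_loss_mask generate_loss_mask_alt
  exact pvLoop_eq input input.length rfl 0 0 _ (by simp) (by omega)
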